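-- pv_equiv track=rewrite | github.com/sprizend-rh/in-cluster-checks | src/in_cluster_checks/rules/hw_fw_details/collectors/disk_collectors.py | _parse_lsblk_output
-- ===== SOURCE A (Python) =====
-- from typing import Dict, List
--
-- def _parse_lsblk_output(output: str) -> List[str]:
--     """
--     Parse lsblk output to find physical disks containing root filesystem.
--
--     Algorithm (from HealthChecks):
--     1. Process lines sequentially
--     2. Lines ending with "disk" are physical disks (no special chars at start)
--     3. Lines ending with "/" or "/sysroot" are root filesystem mounts
--     4. When we find "/" or "/sysroot", the current physical_disk is an OS disk
--     5. This works because lsblk shows parent disks before their volumes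
--
--     Note: In RHCOS (Red Hat CoreOS), the root filesystem is mounted at /sysroot,
--     not /, so we need to check for both.
--
--     Args:
--         output: Output from "lsblk -n" command
--
--     Returns:
--         Sorted list of physical disk names (e.g., ["sda"] or ["sda", "sdb"])
--     """
--     out_lines = [x.strip() for x in output.splitlines()]
--     physical_disks = []
--     current_physical_disk = ""
--
--     for line in out_lines:
--         # Physical disks end with "disk" and have no leading special chars
--         if line.endswith("disk"):
--             # Extract disk name (first column)
--             current_physical_disk = line.split()[0]
--
--         # Root filesystem mount points end with "/" or "/sysroot" (RHCOS)
--         if line.endswith("/") or line.endswith("/sysroot"):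
--             # This partition/volume is on current_physical_disk
--             if current_physical_disk and current_physical_disk not in physical_disks:
--                 physical_disks.append(current_physical_disk)
--
--     return sorted(physical_disks)
-- ===== SOURCE B (Python) =====
-- from typing import List
--
--
-- def _parse_lsblk_output(output: str) -> List[str]:
--     """Group lines under the most recent disk line, then keep the names of
--     groups that contain a root mount; return sorted unique names."""
--     lines = [x.strip() for x in output.splitlines()]
--
--     # groups: most-recent-first list of (disk_name, member_lines)
--     groups = []
--     for line in lines:
--         if line.endswith("disk"):
--             groups.insert(0, (line.split()[0], []))
--         elif groups:
--             groups[0][1].append(line)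
--
--     return sorted({
--         name
--         for name, members in groups
--         if any(m.endswith("/") or m.endswith("/sysroot") for m in members)
--     })
-- ===== Notes on version B (the rewrite author's own statement) =====
-- stated objective: alternative
-- what changed: B splits the stripped lines into groups labelled by the most recent 'disk' line (a group-then-filter decomposition), collects the names of groups containing a root mount into a set and sorts it, instead of A's single scan with a running current-disk flag and an append-if-new list.
import Mathlib
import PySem

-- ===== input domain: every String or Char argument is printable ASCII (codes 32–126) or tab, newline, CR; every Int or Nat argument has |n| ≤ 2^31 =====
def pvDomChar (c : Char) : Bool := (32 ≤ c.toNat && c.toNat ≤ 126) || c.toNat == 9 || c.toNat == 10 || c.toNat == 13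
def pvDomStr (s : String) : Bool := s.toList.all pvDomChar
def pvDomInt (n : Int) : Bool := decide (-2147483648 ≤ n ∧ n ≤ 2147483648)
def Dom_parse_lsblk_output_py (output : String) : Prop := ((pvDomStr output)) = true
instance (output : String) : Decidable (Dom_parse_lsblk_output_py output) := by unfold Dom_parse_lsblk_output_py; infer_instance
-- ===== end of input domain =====

-- B groups the stripped lines under the most recent "disk" line and keeps the names of groups
-- containing a root mount (a group-then-filter decomposition instead of A's running-flag scan);
-- same result, same cost (objective: alternative).

-- ===== PORT A =====
-- literal port of A's single scan with a running current_physical_disk and an append-if-new list.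
-- (the index [0] into line.split() never raises: a line ending in "disk" has a first word — see
-- pv_disk_name_ne_empty below — so pyGetD's default is never used)
def parse_lsblk_output_py (output : String) : List String :=
  let out_lines := (PySem.Str.splitlines output).map (fun x => PySem.Str.strip x)
  let st := out_lines.foldl (fun (st : List String × String) line =>
    let cur := if PySem.Str.endswith line "disk"
               then PySem.List.pyGetD (PySem.Str.split₀ line) 0 ""
               else st.2
    let disks := if (PySem.Str.endswith line "/" || PySem.Str.endswith line "/sysroot")
                    && (cur != "" && !(st.1.contains cur))
                 then st.1 ++ [cur] else st.1
    (disks, cur)) ([], "")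
  PySem.List.sorted st.1 (fun x => x) false

-- ===== PORT B =====
-- literal port of Source B: build the group list (most-recent group first, groups.insert(0, …) = cons,
-- groups[0][1].append(line) = modify the head group), then filter groups, take names as a set, sort.
def parse_lsblk_output_py_alt (output : String) : List String :=
  let lines := (PySem.Str.splitlines output).map (fun x => PySem.Str.strip x)
  let groups := lines.foldl (fun (gs : List (String × List String)) line =>
    if PySem.Str.endswith line "disk" then
      (PySem.List.pyGetD (PySem.Str.split₀ line) 0 "", []) :: gs
    else match gs with
      | [] => []
      | (n, ms) :: t => (n, ms ++ [line]) :: t) []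
  let names : PySem.Set String := PySem.Set.ofList
    ((groups.filter (fun g => g.2.any (fun m =>
        PySem.Str.endswith m "/" || PySem.Str.endswith m "/sysroot"))).map (fun g => g.1))
  PySem.List.sorted names (fun x => x) false

-- ===== PRECONDITION & SPEC =====
def Spec_parse_lsblk_output_py (output : String) (out : List String) : Prop := out = parse_lsblk_output_py_alt output
instance (output : String) (out : List String) : Decidable (Spec_parse_lsblk_output_py output out) := by unfold Spec_parse_lsblk_output_py; infer_instance

-- ===== CLAIM (what is proved, stated in full; the proofs are below) =====
def Claim_equal_parse_lsblk_output_py : Prop := ∀ (output : String), Dom_parse_lsblk_output_py output → Spec_parse_lsblk_output_py output (parse_lsblk_output_py output)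

-- ===== LEMMAS AND PROOFS =====

-- the two loop bodies, named for the proofs (each is definitionally the lambda in its port)
def pvStepA (st : List String × String) (line : String) : List String × String :=
  let cur := if PySem.Str.endswith line "disk"
             then PySem.List.pyGetD (PySem.Str.split₀ line) 0 ""
             else st.2
  let disks := if (PySem.Str.endswith line "/" || PySem.Str.endswith line "/sysroot")
                  && (cur != "" && !(st.1.contains cur))
               then st.1 ++ [cur] else st.1
  (disks, cur)

def pvStepB (gs : List (String × List String)) (line : String) : List (String × List String) :=
  if PySem.Str.endswith line "disk" then
    (PySem.List.pyGetD (PySem.Str.split₀ line) 0 "", []) :: gs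
  else match gs with
    | [] => []
    | (n, ms) :: t => (n, ms ++ [line]) :: t

def pvRoot (m : String) : Bool := PySem.Str.endswith m "/" || PySem.Str.endswith m "/sysroot"

def pvHasRoot (g : String × List String) : Bool := g.2.any (fun m =>
  PySem.Str.endswith m "/" || PySem.Str.endswith m "/sysroot")

lemma pv_portA_unfold (output : String) : parse_lsblk_output_py output =
    PySem.List.sorted (((PySem.Str.splitlines output).map (fun x => PySem.Str.strip x)).foldl
      pvStepA ([], "")).1 (fun x => x) false := rfl

lemma pv_portB_unfold (output : String) : parse_lsblk_output_py_alt output =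
    PySem.List.sorted (PySem.Set.ofList (((((PySem.Str.splitlines output).map
      (fun x => PySem.Str.strip x)).foldl pvStepB []).filter pvHasRoot).map (fun g => g.1)))
      (fun x => x) false := rfl

-- a line ending in "disk" ends in neither "/" nor "/sysroot"
lemma pv_disk_not_root (line : String) (h : PySem.Str.endswith line "disk" = true) :
    pvRoot line = false := by
  rw [PySem.Str.endswith_eq, PySem.Chars.endswith_iff] at h
  rw [pvRoot, Bool.or_eq_false_iff]
  constructor <;>
  · rw [← Bool.not_eq_true, PySem.Str.endswith_eq, PySem.Chars.endswith_iff]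
    intro h2
    rcases List.suffix_or_suffix_of_suffix h h2 with hs | hs <;> revert hs <;> decide

-- every token of split₀.go is nonempty
lemma pv_go_tokens_ne_nil : ∀ (cs cur : List Char) (acc : List (List Char))
    (_ : ∀ a ∈ acc, a ≠ []) (x : List Char), x ∈ PySem.Chars.split₀.go cs cur acc → x ≠ [] := by
  intro cs
  induction cs with
  | nil =>
    intro cur acc hacc x hx
    simp only [PySem.Chars.split₀.go] at hx
    split at hx
    · exact hacc x (List.mem_reverse.mp hx)
    · rcases List.mem_cons.mp (List.mem_reverse.mp hx) with h | h
      · subst h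
        rename_i hne
        simp only [List.isEmpty_iff] at hne
        simp [hne]
      · exact hacc x h
  | cons c rest ih =>
    intro cur acc hacc x hx
    simp only [PySem.Chars.split₀.go] at hx
    split at hx
    · split at hx
      · exact ih [] acc hacc x hx
      · refine ih [] (cur.reverse :: acc) ?_ x hx
        intro a ha
        rcases List.mem_cons.mp ha with h | h
        · subst h
          rename_i hne
          simp only [List.isEmpty_iff] at hne
          simp [hne]
        · exact hacc a h
    · exact ih (c :: cur) acc hacc x hx

-- split₀.go is nonempty when the running word or the accumulator is
lemma pv_go_ne_nil_of_state : ∀ (cs cur : List Char) (acc : List (List Char)),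
    cur ≠ [] ∨ acc ≠ [] → PySem.Chars.split₀.go cs cur acc ≠ [] := by
  intro cs
  induction cs with
  | nil =>
    intro cur acc h
    simp only [PySem.Chars.split₀.go]
    split
    · rename_i hne
      simp only [List.isEmpty_iff] at hne
      rcases h with h | h
      · exact absurd hne h
      · simpa using h
    · simp
  | cons c rest ih =>
    intro cur acc h
    simp only [PySem.Chars.split₀.go]
    split
    · split
      · rename_i hne
        simp only [List.isEmpty_iff] at hne
        rcases h with h | h
        · exact absurd hne h
        · exact ih [] acc (Or.inr h)
      · exact ih [] (cur.reverse :: acc) (Or.inr (by simp))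
    · exact ih (c :: cur) acc (Or.inl (by simp))

-- split₀.go is nonempty when some character is not whitespace
lemma pv_go_ne_nil : ∀ (cs cur : List Char) (acc : List (List Char)),
    (∃ c ∈ cs, PySem.Chars.isspace c = false) → PySem.Chars.split₀.go cs cur acc ≠ [] := by
  intro cs
  induction cs with
  | nil => intro _ _ h; simp at h
  | cons c rest ih =>
    intro cur acc h
    simp only [PySem.Chars.split₀.go]
    split
    · rename_i hsp
      have hrest : ∃ d ∈ rest, PySem.Chars.isspace d = false := by
        rcases h with ⟨d, hd, hds⟩
        rcases List.mem_cons.mp hd with h | h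
        · subst h; rw [hsp] at hds; cases hds
        · exact ⟨d, h, hds⟩
      split
      · exact ih [] acc hrest
      · exact ih [] (cur.reverse :: acc) hrest
    · exact pv_go_ne_nil_of_state rest (c :: cur) acc (Or.inl (by simp))

-- a line ending in "disk" has a nonempty first word
lemma pv_disk_name_ne_empty (line : String)
    (h : PySem.Str.endswith line "disk" = true) :
    PySem.List.pyGetD (PySem.Str.split₀ line) 0 "" ≠ "" := by
  rw [PySem.Str.endswith_eq, PySem.Chars.endswith_iff] at h
  have hk : 'k' ∈ line.toList := h.subset (by decide)
  have hne : PySem.Chars.split₀ line.toList ≠ [] :=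
    pv_go_ne_nil line.toList [] [] ⟨'k', hk, by decide⟩
  have hmap : (PySem.Str.split₀ line).map String.toList = PySem.Chars.split₀ line.toList :=
    PySem.Str.split₀_map_toList line
  cases hs : PySem.Str.split₀ line with
  | nil =>
    rw [hs] at hmap
    simp only [List.map_nil] at hmap
    exact absurd hmap.symm hne
  | cons t ts =>
    rw [PySem.List.pyGetD_zero]
    simp only [List.getD_cons_zero]
    intro ht
    subst ht
    have hmem : ([] : List Char) ∈ PySem.Chars.split₀ line.toList := by
      rw [← hmap, hs]
      simp
    exact pv_go_tokens_ne_nil line.toList [] [] (by simp) [] hmem rfl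

-- evaluations of the two loop bodies on a disk line
lemma pv_stepA_disk (acc : List String) (cur line : String)
    (hd : PySem.Str.endswith line "disk" = true) :
    pvStepA (acc, cur) line = (acc, PySem.List.pyGetD (PySem.Str.split₀ line) 0 "") := by
  have hroot := pv_disk_not_root line hd
  rw [pvRoot, Bool.or_eq_false_iff] at hroot
  unfold pvStepA
  rw [hd, hroot.1, hroot.2]
  simp

lemma pv_stepB_disk (gs : List (String × List String)) (line : String)
    (hd : PySem.Str.endswith line "disk" = true) :
    pvStepB gs line = (PySem.List.pyGetD (PySem.Str.split₀ line) 0 "", []) :: gs := by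
  unfold pvStepB
  rw [hd]
  simp

-- evaluations on a non-disk line
lemma pv_stepA_nondisk (acc : List String) (cur line : String)
    (hd : PySem.Str.endswith line "disk" = false) :
    pvStepA (acc, cur) line =
      (if pvRoot line && (cur != "" && !(acc.contains cur)) then acc ++ [cur] else acc, cur) := by
  unfold pvStepA pvRoot
  rw [hd]
  simp

lemma pv_stepB_nondisk_nil (line : String)
    (hd : PySem.Str.endswith line "disk" = false) : pvStepB [] line = [] := by
  unfold pvStepB
  rw [hd]
  simp

lemma pv_stepB_nondisk_cons (n : String) (ms : List String)
    (t : List (String × List String)) (line : String)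
    (hd : PySem.Str.endswith line "disk" = false) :
    pvStepB ((n, ms) :: t) line = (n, ms ++ [line]) :: t := by
  unfold pvStepB
  rw [hd]
  simp

lemma pv_hasRoot_append (n : String) (ms : List String) (line : String) :
    pvHasRoot (n, ms ++ [line]) = (pvHasRoot (n, ms) || pvRoot line) := by
  simp [pvHasRoot, pvRoot, List.any_append]

-- the coupling invariant between A's running state and B's group list
lemma pv_couple : ∀ (lines : List String) (acc : List String) (cur : String)
    (gs : List (String × List String)),
    acc.Nodup →
    cur = (match gs with | [] => "" | g :: _ => g.1) →
    (∀ g ∈ gs, g.1 ≠ "") →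
    (∀ x, x ∈ acc ↔ x ∈ (gs.filter pvHasRoot).map (fun g => g.1)) →
    (lines.foldl pvStepA (acc, cur)).1.Nodup ∧
    (∀ x, x ∈ (lines.foldl pvStepA (acc, cur)).1 ↔
      x ∈ ((lines.foldl pvStepB gs).filter pvHasRoot).map (fun g => g.1)) := by
  intro lines
  induction lines with
  | nil => intro acc cur gs hnd _ _ hmem; exact ⟨hnd, hmem⟩
  | cons line rest ih =>
    intro acc cur gs hnd hcur hne hmem
    simp only [List.foldl_cons]
    by_cases hd : PySem.Str.endswith line "disk" = true
    · -- disk line: A only updates cur, B starts a fresh empty group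
      rw [pv_stepA_disk acc cur line hd, pv_stepB_disk gs line hd]
      refine ih acc _ _ hnd rfl ?_ ?_
      · intro g hg
        rcases List.mem_cons.mp hg with h | h
        · subst h; exact pv_disk_name_ne_empty line hd
        · exact hne g h
      · intro x
        rw [hmem x]
        have : pvHasRoot (PySem.List.pyGetD (PySem.Str.split₀ line) 0 "", []) = false := by
          simp [pvHasRoot]
        rw [List.filter_cons, this]
        simp
    · rw [Bool.not_eq_true] at hd
      rw [pv_stepA_nondisk acc cur line hd]
      by_cases hr : pvRoot line = true
      · -- root line
        cases gs with
        | nil =>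
          have hcur0 : cur = "" := hcur
          rw [pv_stepB_nondisk_nil line hd, hcur0]
          have : (pvRoot line && (("" != "") && !(acc.contains ""))) = false := by simp
          rw [this, if_neg (by simp)]
          exact ih acc "" [] hnd rfl hne hmem
        | cons g t =>
          obtain ⟨n, ms⟩ := g
          have hcn : cur = n := hcur
          have hn : n ≠ "" := hne (n, ms) (List.mem_cons_self ..)
          rw [pv_stepB_nondisk_cons n ms t line hd, hcn]
          have hnb : (n != "") = true := by simpa using hn
          have hset : (pvRoot line && ((n != "") && !(acc.contains n))) = !(acc.contains n) := by
            rw [hr, hnb]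
            simp
          rw [hset]
          have hHR : pvHasRoot (n, ms ++ [line]) = true := by
            rw [pv_hasRoot_append, hr]
            simp
          refine ih _ n ((n, ms ++ [line]) :: t) ?_ rfl ?_ ?_
          · by_cases hc : acc.contains n = true
            · rw [hc]; simpa using hnd
            · rw [Bool.not_eq_true] at hc
              rw [hc]
              simp only [Bool.not_false, if_pos]
              refine List.Nodup.append hnd (by simp) ?_
              intro a ha hb
              rcases List.mem_singleton.mp hb with rfl
              rw [← List.contains_iff_mem] at ha
              rw [ha] at hc
              cases hc
          · intro g hg
            rcases List.mem_cons.mp hg with h | h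
            · subst h; exact hn
            · exact hne g (List.mem_cons_of_mem _ h)
          · intro x
            have hfil : List.filter pvHasRoot ((n, ms ++ [line]) :: t) =
                (n, ms ++ [line]) :: List.filter pvHasRoot t := by
              rw [List.filter_cons, hHR]
              simp
            rw [hfil]
            simp only [List.map_cons, List.mem_cons]
            have hold : x ∈ acc ↔ (pvHasRoot (n, ms) = true ∧ x = n) ∨
                x ∈ List.map (fun g => g.1) (List.filter pvHasRoot t) := by
              rw [hmem x, List.filter_cons]
              by_cases hp : pvHasRoot (n, ms) = true
              · rw [hp]
                simp
              · rw [Bool.not_eq_true] at hp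
                rw [hp]
                simp
            by_cases hc : acc.contains n = true
            · rw [hc]
              simp only [Bool.not_true, Bool.false_eq_true, if_false]
              constructor
              · intro hxa
                rcases hold.mp hxa with ⟨_, h⟩ | h
                · exact Or.inl h
                · exact Or.inr h
              · rintro (h | h)
                · subst h
                  exact List.contains_iff_mem.mp hc
                · exact hold.mpr (Or.inr h)
            · rw [Bool.not_eq_true] at hc
              rw [hc]
              simp only [Bool.not_false, if_true, List.mem_append, List.mem_singleton]
              constructor
              · rintro (h | h)
                · rcases hold.mp h with ⟨_, h2⟩ | h2
                  · exact Or.inl h2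
                  · exact Or.inr h2
                · exact Or.inl h
              · rintro (h | h)
                · exact Or.inr h
                · exact Or.inl (hold.mpr (Or.inr h))
      · -- ordinary line: A unchanged, B appends it to the current group (root status unchanged)
        rw [Bool.not_eq_true] at hr
        rw [hr]
        simp only [Bool.false_and, Bool.false_eq_true, if_false]
        cases gs with
        | nil =>
          rw [pv_stepB_nondisk_nil line hd]
          exact ih acc cur [] hnd hcur hne hmem
        | cons g t =>
          obtain ⟨n, ms⟩ := g
          rw [pv_stepB_nondisk_cons n ms t line hd]
          have hHR : pvHasRoot (n, ms ++ [line]) = pvHasRoot (n, ms) := by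
            rw [pv_hasRoot_append, hr]
            simp
          refine ih acc cur ((n, ms ++ [line]) :: t) hnd hcur ?_ ?_
          · intro g hg
            rcases List.mem_cons.mp hg with h | h
            · subst h; exact hne (n, ms) (List.mem_cons_self ..)
            · exact hne g (List.mem_cons_of_mem _ h)
          · intro x
            rw [hmem x, List.filter_cons, List.filter_cons, hHR]
            by_cases hp : pvHasRoot (n, ms) = true
            · rw [hp]
              simp
            · rw [Bool.not_eq_true] at hp
              rw [hp]
              simp

-- ===== VERDICT (by name: the statement is the Claim_ definition above) =====
theorem parse_lsblk_output_py_spec : Claim_equal_parse_lsblk_output_py := by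
  intro output _
  unfold Spec_parse_lsblk_output_py
  rw [pv_portA_unfold, pv_portB_unfold]
  obtain ⟨hnd, hmem⟩ := pv_couple ((PySem.Str.splitlines output).map (fun x => PySem.Str.strip x))
    [] "" [] (by simp) rfl (by simp) (by simp)
  apply (PySem.List.sorted_id_eq_sorted_id_iff_perm _ _).mpr
  rw [List.perm_ext_iff_of_nodup hnd (PySem.Set.nodup_ofList _)]
  intro x
  rw [hmem x, PySem.Set.mem_ofList]
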